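-- pv_equiv track=rewrite | github.com/pypi-data/pypi-mirror-225 | packages/animage-data-sorter/animage-data_sorter-1.1.6.tar.gz/animage-data_sorter-1.1.6/data_sorter/restructure/_dicom.py | csa_ascii_read_key
-- ===== SOURCE A (Python) =====
-- def csa_ascii_read_key(csa_ascii_list: list, key: str, default=None):
--     value = ''
--     exist_flag = False
--     for ascii in csa_ascii_list:
--         if ascii.startswith(key):
--             exist_flag = True
--             value = ascii.split('=')[-1].strip().strip('')
--     if exist_flag:
--         return value
--     elif default is None:
--         raise CsaHeaderMissingKeyError(key)
--     else:
--         return default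
-- ===== SOURCE B (Python) =====
-- def csa_ascii_read_key(csa_ascii_list: list, key: str, default=None):
--     for entry in reversed(csa_ascii_list):
--         if entry.startswith(key):
--             return entry.split('=')[-1].strip().strip('')
--     if default is None:
--         raise CsaHeaderMissingKeyError(key)
--     return default
-- ===== Notes on version B (the rewrite author's own statement) =====
-- stated objective: simpler
-- what changed: Backward scan over reversed(csa_ascii_list) returning at the first match, replacing the forward full scan that remembers the last match via a value/flag accumulator; the miss case falls through to the raise/default directly.
import Mathlib
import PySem

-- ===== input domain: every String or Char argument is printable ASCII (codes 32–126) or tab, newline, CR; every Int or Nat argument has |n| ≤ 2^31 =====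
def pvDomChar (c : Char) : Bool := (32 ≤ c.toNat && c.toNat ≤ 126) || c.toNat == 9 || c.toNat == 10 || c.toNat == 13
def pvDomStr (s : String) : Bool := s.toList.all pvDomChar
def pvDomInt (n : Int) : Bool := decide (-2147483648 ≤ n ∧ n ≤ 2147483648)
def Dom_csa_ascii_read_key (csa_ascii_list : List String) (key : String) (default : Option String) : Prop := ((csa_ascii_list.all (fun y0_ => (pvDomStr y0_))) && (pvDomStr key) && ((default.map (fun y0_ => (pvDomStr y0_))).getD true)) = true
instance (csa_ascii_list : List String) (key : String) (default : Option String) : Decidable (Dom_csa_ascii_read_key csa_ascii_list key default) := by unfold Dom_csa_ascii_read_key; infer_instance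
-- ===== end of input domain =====

-- ===== PORT A =====
-- B changes: backward early-exit scan with no accumulator state, instead of a forward full scan with a last-match value/flag (simpler decomposition, same cost).
-- A mirrors the Python raise (no match and default is None) by `none`; Pre_ excludes exactly those inputs.
-- split '=' of a string never yields [], so the [-1] index is always in range; .getD "" is unreachable.
def csaValueA (a : String) : String :=
  PySem.Str.stripChars (PySem.Str.strip ((PySem.List.pyGet? ((PySem.Str.split? a "=").getD []) (-1)).getD "")) ""

def csa_ascii_read_key (csa_ascii_list : List String) (key : String) (default : Option String) : Option String :=
  let st := csa_ascii_list.foldl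
    (fun (s : String × Bool) a =>
      if PySem.Str.startswith a key then (csaValueA a, true) else s)
    ("", false)
  if st.2 then some st.1
  else match default with
    | none => none  -- Python raises CsaHeaderMissingKeyError here; outside Pre_
    | some d => some d

-- ===== PORT B =====
def csaValueB (a : String) : String :=
  PySem.Str.stripChars (PySem.Str.strip ((PySem.List.pyGet? ((PySem.Str.split? a "=").getD []) (-1)).getD "")) ""

def csaLoopB (key : String) : List String → Option String
  | [] => none
  | a :: rest => if PySem.Str.startswith a key then some (csaValueB a) else csaLoopB key rest

def csa_ascii_read_key_alt (csa_ascii_list : List String) (key : String) (default : Option String) : Option String :=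
  match csaLoopB key csa_ascii_list.reverse with
  | some v => some v
  | none =>
    match default with
    | none => none  -- Python raises CsaHeaderMissingKeyError here; outside Pre_
    | some d => some d

-- ===== PRECONDITION & SPEC =====
-- Pre_ excludes exactly the inputs where A raises CsaHeaderMissingKeyError: no entry starts with key and default is None.
def Pre_csa_ascii_read_key (csa_ascii_list : List String) (key : String) (default : Option String) : Prop :=
  (csa_ascii_list.any (fun e => PySem.Str.startswith e key)) = true ∨ default ≠ none
instance (csa_ascii_list : List String) (key : String) (default : Option String) : Decidable (Pre_csa_ascii_read_key csa_ascii_list key default) := by unfold Pre_csa_ascii_read_key; infer_instance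

def pvWitness_csa_ascii_read_key : List String × String × Option String := (["Key = 1", "Other = 2"], "Key", none)

def Spec_csa_ascii_read_key (csa_ascii_list : List String) (key : String) (default : Option String) (out : Option String) : Prop := out = csa_ascii_read_key_alt csa_ascii_list key default
instance (csa_ascii_list : List String) (key : String) (default : Option String) (out : Option String) : Decidable (Spec_csa_ascii_read_key csa_ascii_list key default out) := by unfold Spec_csa_ascii_read_key; infer_instance

-- ===== CLAIM (what is proved, stated in full; the proofs are below) =====
def Claim_equal_csa_ascii_read_key : Prop := ∀ (csa_ascii_list : List String) (key : String) (default : Option String), Dom_csa_ascii_read_key csa_ascii_list key default → Pre_csa_ascii_read_key csa_ascii_list key default → Spec_csa_ascii_read_key csa_ascii_list key default (csa_ascii_read_key csa_ascii_list key default)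

-- ===== LEMMAS AND PROOFS =====
theorem csaValue_eq (a : String) : csaValueA a = csaValueB a := rfl

theorem csaLoopB_append_single (key : String) (xs : List String) (a : String) :
    csaLoopB key (xs ++ [a]) =
      match csaLoopB key xs with
      | some v => some v
      | none => if PySem.Str.startswith a key then some (csaValueB a) else none := by
  induction xs with
  | nil => simp [csaLoopB]
  | cons x xs ih =>
    simp only [List.cons_append, csaLoopB, ih]
    by_cases h : PySem.Chars.startswith x.toList key.toList = true <;>
      simp [PySem.Str.startswith, h]

theorem foldl_eq_loopB (key : String) (l : List String) (s : String × Bool) :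
    l.foldl (fun (s : String × Bool) a =>
      if PySem.Str.startswith a key then (csaValueA a, true) else s) s
    = (match csaLoopB key l.reverse with
       | some v => (v, true)
       | none => s) := by
  induction l generalizing s with
  | nil => rfl
  | cons a rest ih =>
    simp only [List.foldl_cons, List.reverse_cons, ih, csaLoopB_append_single]
    cases h : csaLoopB key rest.reverse with
    | some v => rfl
    | none =>
      by_cases hs : PySem.Chars.startswith a.toList key.toList = true <;>
        simp [PySem.Str.startswith, hs, csaValue_eq]

-- ===== VERDICT (by name: the statement is the Claim_ definition above) =====
theorem csa_ascii_read_key_spec : Claim_equal_csa_ascii_read_key := by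
  intro l key default _ _
  unfold Spec_csa_ascii_read_key csa_ascii_read_key csa_ascii_read_key_alt
  simp only [foldl_eq_loopB]
  cases h : csaLoopB key l.reverse with
  | some v => rfl
  | none => cases default <;> rfl
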